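-- pv_equiv track=rewrite | github.com/Bhavik-Gilbert/Advent-Of-Code | 2024/day1.py | generate_input_lists
-- ===== SOURCE A (Python) =====
-- def generate_input_lists(input_str):
--     input_list = input_str.replace("\n", "   ").split("   ")
--
--     l1 = []
--     l2 = []
--     for i, v in enumerate(input_list):
--         v = int(v)
--         if i % 2 == 0:
--             l1.append(v)
--         else:
--             l2.append(v)
--
--     return l1, l2
-- ===== SOURCE B (Python) =====
-- def generate_input_lists(input_str):
--     tokens = input_str.replace("\n", "   ").split("   ")
--     n = len(tokens)
--     l1 = []
--     l2 = []
--     i = 0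
--     while i + 1 < n:
--         l1.append(int(tokens[i]))
--         l2.append(int(tokens[i + 1]))
--         i += 2
--     if i < n:
--         l1.append(int(tokens[i]))
--     return l1, l2
-- ===== Notes on version B (the rewrite author's own statement) =====
-- stated objective: alternative
-- what changed: A makes one interleaved pass with an i%2 parity branch over enumerate; B consumes the token list two at a time with an index loop stepping by 2 (a pair per iteration, no parity test), handling one odd leftover token after the loop.
import Mathlib
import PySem

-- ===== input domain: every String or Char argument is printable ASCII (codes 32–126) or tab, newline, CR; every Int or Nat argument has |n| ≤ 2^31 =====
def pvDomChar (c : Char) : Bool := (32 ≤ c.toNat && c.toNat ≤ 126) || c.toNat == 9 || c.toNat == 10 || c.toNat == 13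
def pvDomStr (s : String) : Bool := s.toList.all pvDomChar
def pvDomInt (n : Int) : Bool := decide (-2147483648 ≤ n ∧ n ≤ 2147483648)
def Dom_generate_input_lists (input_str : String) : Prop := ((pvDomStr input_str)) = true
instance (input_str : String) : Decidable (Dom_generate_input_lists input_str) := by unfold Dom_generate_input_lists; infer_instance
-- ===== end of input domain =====

-- B replaces A's single enumerate pass with an i%2 parity branch by a pairwise index loop
-- stepping by 2 (objective: alternative decomposition, same cost).

-- int(v); under Pre_ every token parses, so the default 0 is never taken
def pvIntV (s : String) : Int := (PySem.Int.ofStr? s).getD 0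

-- tokens = input_str.replace("\n", "   ").split("   "); the separator is nonempty, so split? is always some
def pvTokens (input_str : String) : List String :=
  (PySem.Str.split? (PySem.Str.replace input_str "\n" "   ") "   ").getD []

-- ===== PORT A =====
def generate_input_lists (input_str : String) : List Int × List Int :=
  let input_list := pvTokens input_str
  let r := (PySem.List.enumerate input_list 0).foldl
    (fun (p : List Int × List Int) iv =>
      let v := pvIntV iv.2
      if PySem.Int.mod iv.1 2 == 0 then (p.1 ++ [v], p.2) else (p.1, p.2 ++ [v]))
    ([], [])
  r

-- ===== PORT B =====
-- the while loop of Source B; n = len(tokens) is toks.length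
def pvBLoop (toks : List String) (i : Nat) (l1 l2 : List Int) : List Int × List Int :=
  if i + 1 < toks.length then
    pvBLoop toks (i + 2) (l1 ++ [pvIntV (PySem.List.pyGetD toks (i : Int) "")])
      (l2 ++ [pvIntV (PySem.List.pyGetD toks ((i : Int) + 1) "")])
  else if i < toks.length then
    (l1 ++ [pvIntV (PySem.List.pyGetD toks (i : Int) "")], l2)
  else (l1, l2)
termination_by toks.length - i

def generate_input_lists_alt (input_str : String) : List Int × List Int :=
  let tokens := pvTokens input_str
  pvBLoop tokens 0 [] []

-- ===== PRECONDITION & SPEC =====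
-- Pre_ excludes exactly the inputs on which Python's int() raises ValueError on some token
-- (both A and B raise there): every token produced by the replace-then-split must parse as an int.
def Pre_generate_input_lists (input_str : String) : Prop :=
  ∀ t ∈ pvTokens input_str, (PySem.Int.ofStr? t).isSome = true
instance (input_str : String) : Decidable (Pre_generate_input_lists input_str) := by
  unfold Pre_generate_input_lists; infer_instance

def pvWitness_generate_input_lists : String := "1   2\n-3   40"

def Spec_generate_input_lists (input_str : String) (out : List Int × List Int) : Prop := out = generate_input_lists_alt input_str
instance (input_str : String) (out : List Int × List Int) : Decidable (Spec_generate_input_lists input_str out) := by unfold Spec_generate_input_lists; infer_instance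

-- ===== CLAIM (what is proved, stated in full; the proofs are below) =====
def Claim_equal_generate_input_lists : Prop := ∀ (input_str : String), Dom_generate_input_lists input_str → Pre_generate_input_lists input_str → Spec_generate_input_lists input_str (generate_input_lists input_str)

-- ===== LEMMAS AND PROOFS =====

-- proof-only: deal a list pairwise into (evens, odds)
def pvDeal : List Int → List Int × List Int
  | [] => ([], [])
  | [x] => ([x], [])
  | x :: y :: r => (x :: (pvDeal r).1, y :: (pvDeal r).2)

-- two-at-a-time induction on lists
theorem pvTwoStep {α : Type} {P : List α → Prop} (h0 : P []) (h1 : ∀ x, P [x])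
    (h2 : ∀ x y r, P r → P (x :: y :: r)) : ∀ l, P l
  | [] => h0
  | [x] => h1 x
  | x :: y :: r => h2 x y r (pvTwoStep h0 h1 h2 r)

theorem pvMod_two_mul (k : Nat) : PySem.Int.mod (2 * (k : Int)) 2 = 0 := by
  rw [PySem.Int.mod_eq_emod_of_pos (by omega)]; omega

theorem pvMod_two_mul_add_one (k : Nat) : PySem.Int.mod (2 * (k : Int) + 1) 2 = 1 := by
  rw [PySem.Int.mod_eq_emod_of_pos (by omega)]; omega

theorem pvLoopA_eq (ts : List String) : ∀ (k : Nat) (l1 l2 : List Int),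
    (PySem.List.enumerate ts (2 * (k : Int))).foldl
      (fun (p : List Int × List Int) iv =>
        let v := pvIntV iv.2
        if PySem.Int.mod iv.1 2 == 0 then (p.1 ++ [v], p.2) else (p.1, p.2 ++ [v]))
      (l1, l2)
    = (l1 ++ (pvDeal (ts.map pvIntV)).1, l2 ++ (pvDeal (ts.map pvIntV)).2) := by
  induction ts using pvTwoStep with
  | h0 => intro k l1 l2; simp [PySem.List.enumerate_nil, pvDeal]
  | h1 x => intro k l1 l2
            simp [PySem.List.enumerate_cons, PySem.List.enumerate_nil, pvDeal]
  | h2 x y r ih =>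
      intro k l1 l2
      have h2' : (2 * (k : Int) + 1) + 1 = 2 * ((k + 1 : Nat) : Int) := by push_cast; ring
      simp only [PySem.List.enumerate_cons, List.foldl_cons, pvMod_two_mul k,
        pvMod_two_mul_add_one k, h2']
      simp only [beq_self_eq_true, if_true]
      rw [show ((1 : Int) == 0) = false by decide]
      simp only [Bool.false_eq_true, if_false]
      rw [ih (k + 1)]
      simp [pvDeal, List.append_assoc]

theorem pvLoopB_eq (ts : List String) (i : Nat) (l1 l2 : List Int) :
    pvBLoop ts i l1 l2
    = (l1 ++ (pvDeal ((ts.drop i).map pvIntV)).1, l2 ++ (pvDeal ((ts.drop i).map pvIntV)).2) := by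
  induction i, l1, l2 using pvBLoop.induct ts with
  | case1 i l1 l2 h ih =>
      have hi : i < ts.length := by omega
      have hi1 : i + 1 < ts.length := h
      rw [pvBLoop]; simp only [h, if_true]
      rw [ih]
      have hd : ts.drop i = ts[i] :: ts[i+1] :: ts.drop (i + 2) := by
        rw [List.drop_eq_getElem_cons hi, List.drop_eq_getElem_cons hi1]
      have hg1 : PySem.List.pyGetD ts (i : Int) "" = ts[i] := by
        rw [PySem.List.pyGetD_natCast, List.getD_eq_getElem _ _ hi]
      have hg2 : PySem.List.pyGetD ts ((i : Int) + 1) "" = ts[i+1] := by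
        rw [show ((i : Int) + 1) = ((i + 1 : Nat) : Int) by push_cast; ring,
            PySem.List.pyGetD_natCast, List.getD_eq_getElem _ _ hi1]
      rw [hd]
      simp only [List.map_cons, pvDeal, hg1, hg2, List.append_assoc, List.singleton_append]
  | case2 i l1 l2 h h' =>
      have hi : i < ts.length := h'
      rw [pvBLoop]; simp only [h, if_false, h', if_true]
      have hd : ts.drop i = [ts[i]] := by
        rw [List.drop_eq_getElem_cons hi]
        have : ts.drop (i + 1) = [] := by
          apply List.drop_eq_nil_of_le; omega
        rw [this]
      have hg1 : PySem.List.pyGetD ts (i : Int) "" = ts[i] := by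
        rw [PySem.List.pyGetD_natCast, List.getD_eq_getElem _ _ hi]
      rw [hd]
      simp only [List.map_cons, List.map_nil, pvDeal, hg1, List.append_nil]
  | case3 i l1 l2 h h' =>
      rw [pvBLoop]; simp only [h, if_false, h', if_false]
      have hd : ts.drop i = [] := by
        apply List.drop_eq_nil_of_le; omega
      rw [hd]
      simp only [List.map_nil, pvDeal, List.append_nil]

theorem generate_input_lists_spec : Claim_equal_generate_input_lists := by
  intro s _ _
  unfold Spec_generate_input_lists generate_input_lists generate_input_lists_alt
  have hA := pvLoopA_eq (pvTokens s) 0 [] []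
  simp only [Nat.cast_zero, mul_zero] at hA
  have hB := pvLoopB_eq (pvTokens s) 0 [] []
  simp only [List.drop_zero] at hB
  simp only [hA, hB, List.nil_append]
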